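-- pv_equiv track=rewrite | github.com/romanzdk/Python-code-quality | slozitost/slozitost.py | complex_function
-- ===== SOURCE A (Python) =====
-- def complex_function(data, threshold):
--     def helper(subset):
--         if len(subset) == 1:
--             return subset[0] > threshold
--         else:
--             mid = len(subset) // 2
--             left = helper(subset[:mid])
--             right = helper(subset[mid:])
--             return left and right
--
--     if not data:
--         return False
--
--     result = 0
--     for i in range(len(data)):
--         for j in range(i, len(data)):
--             if i != j and data[i] == data[j]:
--                 result += 1
--             elif helper(data[i:j+1]):
--                 result += data[i] + data[j]
--             else:
--                 for k in range(i, j+1):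
--                     if data[k] > threshold:
--                         result += 1
--                     else:
--                         for l in range(k+1, len(data)):
--                             if data[l] % data[k] == 0:
--                                 result -= 1
--                             else:
--                                 result += 2
--     return result
-- ===== SOURCE B (Python) =====
-- def complex_function(data, threshold):
--     n = len(data)
--     # per-index contribution of the innermost k/l work, computed once
--     c = []
--     for k in range(n):
--         if data[k] > threshold:
--             c.append(1)
--         else:
--             s = 0
--             for l in range(k + 1, n):
--                 s += -1 if data[l] % data[k] == 0 else 2
--             c.append(s)
--     result = 0
--     for i in range(n):
--         all_above = True
--         seg = 0
--         for j in range(i, n):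
--             all_above = all_above and data[j] > threshold
--             seg += c[j]
--             if i != j and data[i] == data[j]:
--                 result += 1
--             elif all_above:
--                 result += data[i] + data[j]
--             else:
--                 result += seg
--     return result
-- ===== Notes on version B (the rewrite author's own statement) =====
-- stated objective: faster
-- what changed: Replaced the recursive all-above-threshold helper and the per-pair nested k/l scans by a single precomputed per-index contribution table plus running 'all above threshold' and segment-sum accumulators, giving O(1) work per index pair.
-- outside the precondition, e.g. on complex_function([], 0): A returns False, B returns 0
import Mathlib
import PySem

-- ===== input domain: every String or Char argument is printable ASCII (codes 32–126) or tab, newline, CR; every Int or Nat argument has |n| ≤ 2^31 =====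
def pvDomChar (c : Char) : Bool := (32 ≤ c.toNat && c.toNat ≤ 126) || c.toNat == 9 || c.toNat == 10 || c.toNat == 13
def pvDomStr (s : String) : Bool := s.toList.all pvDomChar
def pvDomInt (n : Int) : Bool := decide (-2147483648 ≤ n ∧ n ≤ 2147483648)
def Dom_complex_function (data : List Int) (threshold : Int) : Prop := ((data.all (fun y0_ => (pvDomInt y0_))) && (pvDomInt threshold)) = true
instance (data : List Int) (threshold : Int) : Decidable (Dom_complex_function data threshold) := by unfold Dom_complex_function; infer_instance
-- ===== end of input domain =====

-- B replaces A's recursive helper and per-pair nested k/l scans by a precomputed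
-- per-index contribution table plus running accumulators (objective: faster, O(n^2) vs O(n^4)).

-- ===== PORT A =====
-- helper(subset): recursive split; subset[:mid] / subset[mid:] as PySem slices.
-- On [] Python's helper recurses forever; it is never called on [] (data[i:j+1] with i ≤ j < len is
-- nonempty), so the port returns false there as a totality guard.
def pvHelperA (threshold : Int) (subset : List Int) : Bool :=
  if subset.length = 1 then
    decide (threshold < PySem.List.pyGetD subset 0 0)
  else if subset.length = 0 then
    false
  else
    let mid : Nat := subset.length / 2   -- len(subset) // 2 (nonnegative, so Nat division is exact)
    pvHelperA threshold (PySem.List.slice subset none (some (mid : Int))) &&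
    pvHelperA threshold (PySem.List.slice subset (some (mid : Int)) none)
termination_by subset.length
decreasing_by
  · simp only [PySem.List.slice_to_natCast, List.length_take]
    omega
  · simp only [PySem.List.slice_from_natCast, List.length_drop]
    omega

-- Python returns False on empty data (a bool, not an int); that input is outside Pre_, the port returns 0 there.
def complex_function (data : List Int) (threshold : Int) : Int :=
  if data = [] then 0
  else
    (PySem.List.pyRange 0 (data.length : Int) 1).foldl (fun result i =>
      (PySem.List.pyRange i (data.length : Int) 1).foldl (fun result j =>
        if i ≠ j ∧ PySem.List.pyGetD data i 0 = PySem.List.pyGetD data j 0 then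
          result + 1
        else if pvHelperA threshold (PySem.List.slice data (some i) (some (j + 1))) then
          result + PySem.List.pyGetD data i 0 + PySem.List.pyGetD data j 0
        else
          (PySem.List.pyRange i (j + 1) 1).foldl (fun result k =>
            if threshold < PySem.List.pyGetD data k 0 then
              result + 1
            else
              (PySem.List.pyRange (k + 1) (data.length : Int) 1).foldl (fun result l =>
                if PySem.Int.mod (PySem.List.pyGetD data l 0) (PySem.List.pyGetD data k 0) = 0 then
                  result - 1
                else
                  result + 2) result) result) result) 0

-- ===== PORT B =====
def complex_function_alt (data : List Int) (threshold : Int) : Int :=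
  let n : Int := data.length
  let c : List Int :=
    (PySem.List.pyRange 0 n 1).foldl (fun c k =>
      c ++ [if threshold < PySem.List.pyGetD data k 0 then 1
            else
              (PySem.List.pyRange (k + 1) n 1).foldl (fun s l =>
                s + (if PySem.Int.mod (PySem.List.pyGetD data l 0) (PySem.List.pyGetD data k 0) = 0
                     then -1 else 2)) 0]) []
  (PySem.List.pyRange 0 n 1).foldl (fun result i =>
    ((PySem.List.pyRange i n 1).foldl (fun (st : Int × Bool × Int) j =>
      let aa : Bool := st.2.1 && decide (threshold < PySem.List.pyGetD data j 0)
      let seg : Int := st.2.2 + PySem.List.pyGetD c j 0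
      ((if i ≠ j ∧ PySem.List.pyGetD data i 0 = PySem.List.pyGetD data j 0 then st.1 + 1
        else if aa then st.1 + PySem.List.pyGetD data i 0 + PySem.List.pyGetD data j 0
        else st.1 + seg), aa, seg)) (result, true, 0)).1) 0

-- ===== PRECONDITION & SPEC =====
-- Pre_ excludes (a) empty data, where A returns the bool False rather than an int (B returns 0 there),
-- and (b) a 0 anywhere before the last position when 0 ≤ threshold, where both Pythons raise ZeroDivisionError.
def Pre_complex_function (data : List Int) (threshold : Int) : Prop :=
  data ≠ [] ∧ (0 ≤ threshold → (0 : Int) ∉ data.dropLast)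
instance (data : List Int) (threshold : Int) : Decidable (Pre_complex_function data threshold) := by
  unfold Pre_complex_function; infer_instance

def pvWitness_complex_function : List Int × Int := ([1, -2, 3], 0)

def Spec_complex_function (data : List Int) (threshold : Int) (out : Int) : Prop := out = complex_function_alt data threshold
instance (data : List Int) (threshold : Int) (out : Int) : Decidable (Spec_complex_function data threshold out) := by unfold Spec_complex_function; infer_instance

-- ===== CLAIM (what is proved, stated in full; the proofs are below) =====
def Claim_equal_complex_function : Prop := ∀ (data : List Int) (threshold : Int), Dom_complex_function data threshold → Pre_complex_function data threshold → Spec_complex_function data threshold (complex_function data threshold)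

-- ===== LEMMAS AND PROOFS =====

-- the contribution of index k in A's innermost k/l work (B's table entry)
def pvC (data : List Int) (threshold : Int) (k : Int) : Int :=
  if threshold < PySem.List.pyGetD data k 0 then 1
  else
    (PySem.List.pyRange (k + 1) (data.length : Int) 1).foldl (fun s l =>
      s + (if PySem.Int.mod (PySem.List.pyGetD data l 0) (PySem.List.pyGetD data k 0) = 0
           then -1 else 2)) 0

-- the contribution of the pair (i, j)
def pvF (data : List Int) (threshold : Int) (i j : Int) : Int :=
  if i ≠ j ∧ PySem.List.pyGetD data i 0 = PySem.List.pyGetD data j 0 then 1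
  else if (PySem.List.pyRange i (j + 1) 1).all (fun k => decide (threshold < PySem.List.pyGetD data k 0)) then
    PySem.List.pyGetD data i 0 + PySem.List.pyGetD data j 0
  else ((PySem.List.pyRange i (j + 1) 1).map (pvC data threshold)).sum

lemma pvHelperA_eq_all (threshold : Int) :
    ∀ (s : List Int), s ≠ [] → pvHelperA threshold s = s.all (fun x => decide (threshold < x)) := by
  have key : ∀ (n : Nat) (s : List Int), s.length ≤ n → s ≠ [] →
      pvHelperA threshold s = s.all (fun x => decide (threshold < x)) := by
    intro n
    induction n with
    | zero =>
      intro s h hne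
      cases s with
      | nil => exact absurd rfl hne
      | cons a t => simp at h
    | succ n ih =>
      intro s hlen hne
      rw [pvHelperA]
      by_cases h1 : s.length = 1
      · obtain ⟨x, rfl⟩ : ∃ x, s = [x] := by
          cases s with
          | nil => simp at h1
          | cons a t =>
            cases t with
            | nil => exact ⟨a, rfl⟩
            | cons b u => simp at h1
        simp [PySem.List.pyGetD_zero_cons]
      · have h0 : s.length ≠ 0 := by
          cases s with
          | nil => exact absurd rfl hne
          | cons a t => simp
        simp only [h1, h0, if_false]
        rw [PySem.List.slice_to_natCast, PySem.List.slice_from_natCast]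
        have hmid1 : 1 ≤ s.length / 2 := by omega
        have hmid2 : s.length / 2 < s.length := by omega
        rw [ih (s.take (s.length / 2)) (by simp; omega)
              (by apply List.ne_nil_of_length_pos; simp; omega),
            ih (s.drop (s.length / 2)) (by simp; omega)
              (by apply List.ne_nil_of_length_pos; simp; omega)]
        rw [← List.all_append, List.take_append_drop]
  intro s hne
  exact key s.length s le_rfl hne

lemma all_pyRange_eq_all_slice (data : List Int) (threshold : Int) :
    ∀ (m : Nat) (a b : Int), 0 ≤ a → b ≤ (data.length : Int) → (b - a).toNat = m →
    (PySem.List.pyRange a b 1).all (fun k => decide (threshold < PySem.List.pyGetD data k 0))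
      = ((data.drop a.toNat).take (b - a).toNat).all (fun x => decide (threshold < x)) := by
  intro m
  induction m with
  | zero =>
    intro a b ha hb hm
    have hba : b ≤ a := by omega
    rw [PySem.List.pyRange_one_eq_nil hba, hm]
    simp
  | succ n ih =>
    intro a b ha hb hm
    have hab : a < b := by omega
    rw [PySem.List.pyRange_one_cons hab]
    have halen : a.toNat < data.length := by omega
    have hdrop : data.drop a.toNat = data[a.toNat] :: data.drop (a.toNat + 1) := by
      rw [List.getElem_cons_drop]
    rw [hdrop, hm]
    simp only [List.all_cons, List.take_succ_cons]
    rw [PySem.List.pyGetD_eq_getElem (xs := data) (i := a) (d := 0) ha (by omega)]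
    have h2 : (a.toNat + 1) = (a + 1).toNat := by omega
    have h3 : n = (b - (a + 1)).toNat := by omega
    rw [h2, h3, ih (a + 1) b (by omega) hb (by omega)]

lemma A_pair_body (data : List Int) (threshold i j r : Int)
    (hi : 0 ≤ i) (hij : i ≤ j) (hj : j < (data.length : Int)) :
    (if i ≠ j ∧ PySem.List.pyGetD data i 0 = PySem.List.pyGetD data j 0 then r + 1
     else if pvHelperA threshold (PySem.List.slice data (some i) (some (j + 1))) then
       r + PySem.List.pyGetD data i 0 + PySem.List.pyGetD data j 0
     else
       (PySem.List.pyRange i (j + 1) 1).foldl (fun result k =>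
         if threshold < PySem.List.pyGetD data k 0 then result + 1
         else
           (PySem.List.pyRange (k + 1) (data.length : Int) 1).foldl (fun result l =>
             if PySem.Int.mod (PySem.List.pyGetD data l 0) (PySem.List.pyGetD data k 0) = 0 then
               result - 1
             else result + 2) result) r)
    = r + pvF data threshold i j := by
  have hslice : PySem.List.slice data (some i) (some (j + 1)) =
      (data.drop i.toNat).take ((j + 1 - i)).toNat := by
    rw [PySem.List.slice_toNat data hi (by omega : (0 : Int) ≤ j + 1)]
    congr 1
    omega
  have hne : (data.drop i.toNat).take ((j + 1 - i)).toNat ≠ [] := by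
    apply List.ne_nil_of_length_pos
    simp only [List.length_take, List.length_drop]
    omega
  have hhelp : pvHelperA threshold (PySem.List.slice data (some i) (some (j + 1)))
      = (PySem.List.pyRange i (j + 1) 1).all
          (fun k => decide (threshold < PySem.List.pyGetD data k 0)) := by
    rw [hslice, pvHelperA_eq_all _ _ hne,
        ← all_pyRange_eq_all_slice data threshold (j + 1 - i).toNat i (j + 1) hi (by omega) rfl]
  rw [hhelp, pvF]
  by_cases hcond : i ≠ j ∧ PySem.List.pyGetD data i 0 = PySem.List.pyGetD data j 0
  · rw [if_pos hcond, if_pos hcond]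
  · rw [if_neg hcond, if_neg hcond]
    by_cases hall : (PySem.List.pyRange i (j + 1) 1).all
        (fun k => decide (threshold < PySem.List.pyGetD data k 0)) = true
    · rw [if_pos hall, if_pos hall]
      ring
    · rw [if_neg hall, if_neg hall]
      have hk : ∀ (acc k : Int), k ∈ PySem.List.pyRange i (j + 1) 1 →
          (if threshold < PySem.List.pyGetD data k 0 then acc + 1
           else
             (PySem.List.pyRange (k + 1) (data.length : Int) 1).foldl (fun result l =>
               if PySem.Int.mod (PySem.List.pyGetD data l 0) (PySem.List.pyGetD data k 0) = 0 then
                 result - 1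
               else result + 2) acc)
          = acc + pvC data threshold k := by
        intro acc k _
        rw [pvC]
        by_cases hk2 : threshold < PySem.List.pyGetD data k 0
        · rw [if_pos hk2, if_pos hk2]
        · rw [if_neg hk2, if_neg hk2]
          have hl : ∀ (s l : Int), l ∈ PySem.List.pyRange (k + 1) (data.length : Int) 1 →
              (if PySem.Int.mod (PySem.List.pyGetD data l 0) (PySem.List.pyGetD data k 0) = 0 then
                 s - 1
               else s + 2)
              = s + (if PySem.Int.mod (PySem.List.pyGetD data l 0) (PySem.List.pyGetD data k 0) = 0
                     then -1 else 2) := by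
            intro s l _
            by_cases hz : PySem.Int.mod (PySem.List.pyGetD data l 0) (PySem.List.pyGetD data k 0) = 0
            · simp [hz]
              ring
            · simp [hz]
          rw [PySem.List.foldl_congr_mem (PySem.List.pyRange (k + 1) (data.length : Int) 1) _
                (fun s l => s + (if PySem.Int.mod (PySem.List.pyGetD data l 0)
                  (PySem.List.pyGetD data k 0) = 0 then (-1 : Int) else 2)) acc hl,
              PySem.List.foldl_add, PySem.List.foldl_add]
          ring
      rw [PySem.List.foldl_congr_mem (PySem.List.pyRange i (j + 1) 1) _
            (fun acc k => acc + pvC data threshold k) r hk,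
          PySem.List.foldl_add]

lemma B_inner (data : List Int) (threshold : Int) (c : List Int)
    (hc : ∀ k : Int, 0 ≤ k → k < (data.length : Int) →
            PySem.List.pyGetD c k 0 = pvC data threshold k) :
    ∀ (m : Nat) (j0 i r : Int), 0 ≤ i → i ≤ j0 → j0 ≤ (data.length : Int) →
      ((data.length : Int) - j0).toNat = m →
      ((PySem.List.pyRange j0 (data.length : Int) 1).foldl (fun (st : Int × Bool × Int) j =>
        ((if i ≠ j ∧ PySem.List.pyGetD data i 0 = PySem.List.pyGetD data j 0 then st.1 + 1
          else if st.2.1 && decide (threshold < PySem.List.pyGetD data j 0) then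
            st.1 + PySem.List.pyGetD data i 0 + PySem.List.pyGetD data j 0
          else st.1 + (st.2.2 + PySem.List.pyGetD c j 0),
          st.2.1 && decide (threshold < PySem.List.pyGetD data j 0),
          st.2.2 + PySem.List.pyGetD c j 0)))
        (r, (PySem.List.pyRange i j0 1).all (fun k => decide (threshold < PySem.List.pyGetD data k 0)),
            ((PySem.List.pyRange i j0 1).map (pvC data threshold)).sum)).1
      = r + ((PySem.List.pyRange j0 (data.length : Int) 1).map (pvF data threshold i)).sum := by
  intro m
  induction m with
  | zero =>
    intro j0 i r hi hij0 hj0 hm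
    rw [PySem.List.pyRange_one_eq_nil (a := j0) (b := (data.length : Int)) (by omega)]
    simp
  | succ nn ih =>
    intro j0 i r hi hij0 hj0 hm
    have hlt : j0 < (data.length : Int) := by omega
    rw [PySem.List.pyRange_one_cons hlt]
    simp only [List.foldl_cons, List.map_cons, List.sum_cons]
    have haa : ((PySem.List.pyRange i j0 1).all
          (fun k => decide (threshold < PySem.List.pyGetD data k 0))
          && decide (threshold < PySem.List.pyGetD data j0 0))
        = (PySem.List.pyRange i (j0 + 1) 1).all
            (fun k => decide (threshold < PySem.List.pyGetD data k 0)) := by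
      rw [PySem.List.pyRange_one_succ_right hij0, List.all_append]
      simp
    have hseg : ((PySem.List.pyRange i j0 1).map (pvC data threshold)).sum
          + PySem.List.pyGetD c j0 0
        = ((PySem.List.pyRange i (j0 + 1) 1).map (pvC data threshold)).sum := by
      rw [PySem.List.pyRange_one_succ_right hij0, hc j0 (by omega) hlt]
      simp
    rw [haa, hseg, ih (j0 + 1) i _ hi (by omega) (by omega) (by omega)]
    rw [pvF]
    split_ifs <;> ring

-- ===== VERDICT (by name: the statement is the Claim_ definition above) =====
theorem complex_function_spec : Claim_equal_complex_function := by
  unfold Claim_equal_complex_function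
  intro data threshold _ hpre
  unfold Spec_complex_function
  simp only [complex_function, complex_function_alt, if_neg hpre.1,
             PySem.List.foldl_append_singleton_eq_map, List.nil_append]
  have hc : ∀ k : Int, 0 ≤ k → k < (data.length : Int) →
      PySem.List.pyGetD ((PySem.List.pyRange 0 (data.length : Int) 1).map
        (fun k => if threshold < PySem.List.pyGetD data k 0 then 1
          else
            (PySem.List.pyRange (k + 1) (data.length : Int) 1).foldl (fun s l =>
              s + (if PySem.Int.mod (PySem.List.pyGetD data l 0) (PySem.List.pyGetD data k 0) = 0
                   then -1 else 2)) 0)) k 0 = pvC data threshold k := by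
    intro k hk1 hk2
    rw [PySem.List.pyGetD_map_pyRange_of_nonneg _ _ _ _ hk1 hk2, pvC]
  have hA : ∀ (r i : Int), i ∈ PySem.List.pyRange 0 (data.length : Int) 1 →
      (PySem.List.pyRange i (data.length : Int) 1).foldl (fun result j =>
        if i ≠ j ∧ PySem.List.pyGetD data i 0 = PySem.List.pyGetD data j 0 then
          result + 1
        else if pvHelperA threshold (PySem.List.slice data (some i) (some (j + 1))) then
          result + PySem.List.pyGetD data i 0 + PySem.List.pyGetD data j 0
        else
          (PySem.List.pyRange i (j + 1) 1).foldl (fun result k =>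
            if threshold < PySem.List.pyGetD data k 0 then
              result + 1
            else
              (PySem.List.pyRange (k + 1) (data.length : Int) 1).foldl (fun result l =>
                if PySem.Int.mod (PySem.List.pyGetD data l 0) (PySem.List.pyGetD data k 0) = 0 then
                  result - 1
                else
                  result + 2) result) result) r
      = r + ((PySem.List.pyRange i (data.length : Int) 1).map (pvF data threshold i)).sum := by
    intro r i hmem
    rw [PySem.List.mem_pyRange_one] at hmem
    have hbody : ∀ (acc j : Int), j ∈ PySem.List.pyRange i (data.length : Int) 1 →
        (if i ≠ j ∧ PySem.List.pyGetD data i 0 = PySem.List.pyGetD data j 0 then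
          acc + 1
        else if pvHelperA threshold (PySem.List.slice data (some i) (some (j + 1))) then
          acc + PySem.List.pyGetD data i 0 + PySem.List.pyGetD data j 0
        else
          (PySem.List.pyRange i (j + 1) 1).foldl (fun result k =>
            if threshold < PySem.List.pyGetD data k 0 then
              result + 1
            else
              (PySem.List.pyRange (k + 1) (data.length : Int) 1).foldl (fun result l =>
                if PySem.Int.mod (PySem.List.pyGetD data l 0) (PySem.List.pyGetD data k 0) = 0 then
                  result - 1
                else
                  result + 2) result) acc)
        = acc + pvF data threshold i j := by
      intro acc j hjmem
      rw [PySem.List.mem_pyRange_one] at hjmem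
      exact A_pair_body data threshold i j acc hmem.1 hjmem.1 hjmem.2
    rw [PySem.List.foldl_congr_mem (PySem.List.pyRange i (data.length : Int) 1) _
          (fun acc j => acc + pvF data threshold i j) r hbody,
        PySem.List.foldl_add]
  rw [PySem.List.foldl_congr_mem (PySem.List.pyRange 0 (data.length : Int) 1) _
        (fun r i => r + ((PySem.List.pyRange i (data.length : Int) 1).map (pvF data threshold i)).sum)
        0 (fun r i hmem => hA r i hmem)]
  have hB : ∀ (r i : Int), i ∈ PySem.List.pyRange 0 (data.length : Int) 1 →
      ((PySem.List.pyRange i (data.length : Int) 1).foldl (fun (st : Int × Bool × Int) j =>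
        ((if i ≠ j ∧ PySem.List.pyGetD data i 0 = PySem.List.pyGetD data j 0 then st.1 + 1
          else if st.2.1 && decide (threshold < PySem.List.pyGetD data j 0) then
            st.1 + PySem.List.pyGetD data i 0 + PySem.List.pyGetD data j 0
          else st.1 + (st.2.2 + PySem.List.pyGetD ((PySem.List.pyRange 0 (data.length : Int) 1).map
            (fun k => if threshold < PySem.List.pyGetD data k 0 then 1
              else
                (PySem.List.pyRange (k + 1) (data.length : Int) 1).foldl (fun s l =>
                  s + (if PySem.Int.mod (PySem.List.pyGetD data l 0) (PySem.List.pyGetD data k 0) = 0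
                       then -1 else 2)) 0)) j 0),
          st.2.1 && decide (threshold < PySem.List.pyGetD data j 0),
          st.2.2 + PySem.List.pyGetD ((PySem.List.pyRange 0 (data.length : Int) 1).map
            (fun k => if threshold < PySem.List.pyGetD data k 0 then 1
              else
                (PySem.List.pyRange (k + 1) (data.length : Int) 1).foldl (fun s l =>
                  s + (if PySem.Int.mod (PySem.List.pyGetD data l 0) (PySem.List.pyGetD data k 0) = 0
                       then -1 else 2)) 0)) j 0)))
        (r, true, 0)).1
      = r + ((PySem.List.pyRange i (data.length : Int) 1).map (pvF data threshold i)).sum := by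
    intro r i hmem
    rw [PySem.List.mem_pyRange_one] at hmem
    have h0 := B_inner data threshold _ hc ((data.length : Int) - i).toNat i i r hmem.1 le_rfl
      (by omega) rfl
    rw [PySem.List.pyRange_one_eq_nil (le_refl i)] at h0
    simpa using h0
  rw [PySem.List.foldl_congr_mem (PySem.List.pyRange 0 (data.length : Int) 1) _
        (fun r i => r + ((PySem.List.pyRange i (data.length : Int) 1).map (pvF data threshold i)).sum)
        0 (fun r i hmem => hB r i hmem)]
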